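-- pv_equiv track=rewrite | github.com/topherCantrell/sim-Katamino | src/solver.py | ok_blanks
-- ===== SOURCE A (Python) =====
-- def _rec_blanks(blanks, cur_set, current):
--     test_cell = (current[0] + 1, current[1])
--     if test_cell in blanks:
--         cur_set.append(test_cell)
--         del blanks[blanks.index(test_cell)]
--         _rec_blanks(blanks, cur_set, test_cell)
--     test_cell = (current[0] - 1, current[1])
--     if test_cell in blanks:
--         cur_set.append(test_cell)
--         del blanks[blanks.index(test_cell)]
--         _rec_blanks(blanks, cur_set, test_cell)
--     test_cell = (current[0], current[1] + 1)
--     if test_cell in blanks: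
--         cur_set.append(test_cell)
--         del blanks[blanks.index(test_cell)]
--         _rec_blanks(blanks, cur_set, test_cell)
--     test_cell = (current[0], current[1] - 1)
--     if test_cell in blanks:
--         cur_set.append(test_cell)
--         del blanks[blanks.index(test_cell)]
--         _rec_blanks(blanks, cur_set, test_cell)
--
-- def ok_blanks(board):
--     # return True
--     blanks = []
--     for y in range(len(board)):
--         for x in range(len(board[0])):
--             if board[y][x] == 0:
--                 blanks.append((x, y))
--     stuck_count = 0
--     while blanks:
--         stuck_count += 1
--         if stuck_count == 500:
--             raise Exception('We are stuck')
--         cur_set = [blanks[0]]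
--         del blanks[0]
--         _rec_blanks(blanks, cur_set, cur_set[0])
--         if (len(cur_set) % 5) != 0:
--             return False
--
--     return True
-- ===== SOURCE B (Python) =====
-- def ok_blanks(board):
--     width = len(board[0]) if board else 0
--     blanks = [(x, y) for y, row in enumerate(board) for x in range(width) if row[x] == 0]
--     stuck_count = 0
--     while blanks:
--         stuck_count += 1
--         if stuck_count == 500:
--             raise Exception('We are stuck')
--         seed = blanks.pop(0)
--         size = 1
--         stack = [(seed, [(1, 0), (-1, 0), (0, 1), (0, -1)])]
--         while stack:
--             cell, dirs = stack.pop()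
--             if not dirs:
--                 continue
--             d = dirs[0]
--             stack.append((cell, dirs[1:]))
--             nxt = (cell[0] + d[0], cell[1] + d[1])
--             if nxt in blanks:
--                 blanks.remove(nxt)
--                 size += 1
--                 stack.append((nxt, [(1, 0), (-1, 0), (0, 1), (0, -1)]))
--         if size % 5 != 0:
--             return False
--     return True
-- ===== Notes on version B (the rewrite author's own statement) =====
-- stated objective: alternative
-- what changed: B replaces A's recursive flood fill (_rec_blanks, four copy-pasted neighbour blocks recursing with list.index deletion) by an iterative explicit work stack of (cell, remaining-directions) frames inside the component loop, and builds the blank list with an enumerate comprehension instead of index-range loops.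
import Mathlib
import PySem

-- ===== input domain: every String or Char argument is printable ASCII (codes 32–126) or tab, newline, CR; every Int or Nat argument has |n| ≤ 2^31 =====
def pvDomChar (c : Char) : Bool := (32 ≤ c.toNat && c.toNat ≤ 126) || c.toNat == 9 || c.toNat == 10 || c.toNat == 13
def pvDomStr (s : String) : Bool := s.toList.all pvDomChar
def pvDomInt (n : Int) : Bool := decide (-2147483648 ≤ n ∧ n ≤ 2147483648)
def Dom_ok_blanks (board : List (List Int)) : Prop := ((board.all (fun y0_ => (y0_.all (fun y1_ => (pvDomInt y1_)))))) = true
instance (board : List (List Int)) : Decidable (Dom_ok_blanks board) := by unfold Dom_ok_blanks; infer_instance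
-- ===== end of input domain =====

-- B replaces A's recursive flood fill by an explicit work stack (and builds the blank list by
-- an enumerate comprehension); objective: alternative (iterative instead of recursive — no
-- recursion-depth limit), same asymptotic cost.  Python A mutates nothing observable.

-- ===== PORT A =====
-- the four neighbour offsets A probes, in A's order
def pvDirs : List (Int × Int) := [(1, 0), (-1, 0), (0, 1), (0, -1)]

-- _rec_blanks: the four sequential neighbour blocks are one structural pass over pvDirs;
-- `del blanks[blanks.index(t)]` = erase first occurrence.  `fuel` is a totality guard only
-- (structural recursion); the seed 5 * blanks.length + 5 in loopA is never exhausted, since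
-- every nested call has consumed a blank and every sibling call a direction.
def recGo : Nat → List (Int × Int) → List (Int × Int) → List (Int × Int) → (Int × Int) →
    List (Int × Int) × List (Int × Int)
  | _, [], blanks, curSet, _ => (blanks, curSet)
  | 0, _ :: _, blanks, curSet, _ => (blanks, curSet)  -- fuel guard only, never reached
  | fuel + 1, d :: ds, blanks, curSet, current =>
    let t : Int × Int := (current.1 + d.1, current.2 + d.2)
    if t ∈ blanks then
      let r1 := recGo fuel pvDirs (blanks.erase t) (curSet ++ [t]) t
      recGo fuel ds r1.1 r1.2 current
    else recGo fuel ds blanks curSet current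

-- cited by loopA's termination proof (so it must precede loopA)
theorem recGo_fst_le (fuel : Nat) :
    ∀ (dirs blanks curSet : List (Int × Int)) (current : Int × Int),
    (recGo fuel dirs blanks curSet current).1.length ≤ blanks.length := by
  induction fuel with
  | zero =>
    intro dirs blanks curSet current
    cases dirs <;> simp [recGo]
  | succ f ih =>
    intro dirs blanks curSet current
    cases dirs with
    | nil => simp [recGo]
    | cons d ds =>
      by_cases h : (current.1 + d.1, current.2 + d.2) ∈ blanks
      · simp only [recGo, if_pos h]
        have h1 := ih pvDirs (blanks.erase (current.1 + d.1, current.2 + d.2))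
          (curSet ++ [(current.1 + d.1, current.2 + d.2)]) (current.1 + d.1, current.2 + d.2)
        have h2 := ih ds
          (recGo f pvDirs (blanks.erase (current.1 + d.1, current.2 + d.2))
            (curSet ++ [(current.1 + d.1, current.2 + d.2)]) (current.1 + d.1, current.2 + d.2)).1
          (recGo f pvDirs (blanks.erase (current.1 + d.1, current.2 + d.2))
            (curSet ++ [(current.1 + d.1, current.2 + d.2)]) (current.1 + d.1, current.2 + d.2)).2
          current
        have h3 : (blanks.erase (current.1 + d.1, current.2 + d.2)).length ≤ blanks.length :=
          List.length_erase_le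
        exact le_trans h2 (le_trans h1 h3)
      · simp only [recGo, if_neg h]
        exact ih ds blanks curSet current

-- the `while blanks:` loop of A
def loopA (blanks : List (Int × Int)) (stuck : Int) : Bool :=
  match blanks with
  | [] => true
  | b :: rest =>
    let stuck' := stuck + 1
    if stuck' == 500 then false  -- Python raises Exception('We are stuck') here; excluded by Pre_
    else
      let r := recGo (5 * rest.length + 5) pvDirs rest [b] b
      if r.2.length % 5 ≠ 0 then false else loopA r.1 stuck'
termination_by blanks.length
decreasing_by exact Nat.lt_succ_of_le (recGo_fst_le _ _ _ _ _)

-- blank collection: for y in range(len(board)), x in range(len(board[0])); board[y][x]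
-- via getD (indices are in range on Pre_; ragged rows, where Python raises, are outside Pre_)
def blanksA (board : List (List Int)) : List (Int × Int) :=
  (List.range board.length).foldl (fun acc y =>
    (List.range (board.headD []).length).foldl (fun acc2 x =>
      if (board.getD y []).getD x 1 == 0 then acc2 ++ [((x : Int), (y : Int))] else acc2) acc) []

def ok_blanks (board : List (List Int)) : Bool :=
  loopA (blanksA board) 0

-- ===== PORT B =====
-- the inner `while stack:` loop of B: frames are (cell, remaining directions); `fuel` is a
-- totality guard only (one unit per loop iteration; the seed in loopB is never exhausted)
def machine : Nat → List ((Int × Int) × List (Int × Int)) → List (Int × Int) → Int →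
    List (Int × Int) × Int
  | _, [], blanks, size => (blanks, size)
  | 0, _ :: _, blanks, size => (blanks, size)  -- fuel guard only, never reached
  | fuel + 1, (cell, dirs) :: rest, blanks, size =>
    match dirs with
    | [] => machine fuel rest blanks size
    | d :: ds =>
      let nxt : Int × Int := (cell.1 + d.1, cell.2 + d.2)
      if nxt ∈ blanks then
        machine fuel ((nxt, pvDirs) :: (cell, ds) :: rest) (blanks.erase nxt) (size + 1)
      else machine fuel ((cell, ds) :: rest) blanks size

-- cited by loopB's termination proof (so it must precede loopB)
theorem machine_fst_le (fuel : Nat) :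
    ∀ (stack : List ((Int × Int) × List (Int × Int))) (blanks : List (Int × Int)) (size : Int),
    (machine fuel stack blanks size).1.length ≤ blanks.length := by
  induction fuel with
  | zero =>
    intro stack blanks size
    cases stack <;> simp [machine]
  | succ f ih =>
    intro stack blanks size
    match stack with
    | [] => simp [machine]
    | (cell, []) :: rest => simpa [machine] using ih rest blanks size
    | (cell, d :: ds) :: rest =>
      by_cases h : (cell.1 + d.1, cell.2 + d.2) ∈ blanks
      · simp only [machine, if_pos h]
        have h1 := ih ((( cell.1 + d.1, cell.2 + d.2), pvDirs) :: (cell, ds) :: rest)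
          (blanks.erase (cell.1 + d.1, cell.2 + d.2)) (size + 1)
        have h3 : (blanks.erase (cell.1 + d.1, cell.2 + d.2)).length ≤ blanks.length :=
          List.length_erase_le
        exact le_trans h1 h3
      · simp only [machine, if_neg h]
        exact ih ((cell, ds) :: rest) blanks size

-- the `while blanks:` loop of B
def loopB (blanks : List (Int × Int)) (stuck : Int) : Bool :=
  match blanks with
  | [] => true
  | seed :: rest =>
    let stuck' := stuck + 1
    if stuck' == 500 then false  -- Python raises Exception('We are stuck') here; excluded by Pre_
    else
      let r := machine (5 * rest.length + 6) [(seed, pvDirs)] rest 1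
      if PySem.Int.mod r.2 5 ≠ 0 then false else loopB r.1 stuck'
termination_by blanks.length
decreasing_by exact Nat.lt_succ_of_le (machine_fst_le _ _ _ _)

-- [(x, y) for y, row in enumerate(board) for x in range(width) if row[x] == 0]
def blanksB (board : List (List Int)) : List (Int × Int) :=
  let width : Nat := match board with | [] => 0 | r :: _ => r.length
  (PySem.List.enumerate board).foldl (fun acc (p : Int × List Int) =>
    (List.range width).foldl (fun acc2 (x : Nat) =>
      if p.2.getD x 1 == 0 then acc2 ++ [((x : Int), p.1)] else acc2) acc) []

def ok_blanks_alt (board : List (List Int)) : Bool :=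
  loopB (blanksB board) 0

-- ===== PRECONDITION & SPEC =====
-- Pre_ excludes exactly the inputs where Python A raises: ragged boards (a row shorter than
-- row 0 → IndexError) and boards whose blank cells split into ≥ 500 components with the first
-- 499 (in discovery order) all of size divisible by 5 → Exception('We are stuck').
-- The component helper below is an independent fixed-point flood fill, not either port's code.
def preAdj (a b : Int × Int) : Bool := (a.1 - b.1).natAbs + (a.2 - b.2).natAbs == 1

def preGrow (blanks comp : List (Int × Int)) : List (Int × Int) :=
  comp ++ blanks.filter (fun c => !comp.contains c && comp.any (fun e => preAdj c e))

def preClosure : Nat → List (Int × Int) → List (Int × Int) → List (Int × Int)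
  | 0, _, comp => comp
  | n + 1, blanks, comp =>
    let comp2 := preGrow blanks comp
    if comp2.length == comp.length then comp else preClosure n blanks comp2

def preComps (fuel : Nat) (blanks : List (Int × Int)) : List Nat :=
  match fuel, blanks with
  | 0, _ => []
  | _, [] => []
  | fuel + 1, b :: rest =>
    let comp := preClosure (rest.length + 1) (b :: rest) [b]
    comp.length :: preComps fuel (rest.filter (fun c => !comp.contains c))

def preBlanks (board : List (List Int)) : List (Int × Int) :=
  board.zipIdx.flatMap (fun p : List Int × Nat =>
    (List.range (board.headD []).length).filterMap (fun x : Nat =>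
      if p.1.getD x 1 = 0 then some ((x : Int), (p.2 : Int)) else none))

def Pre_ok_blanks (board : List (List Int)) : Prop :=
  (∀ r ∈ board, (board.headD []).length ≤ r.length) ∧
  ¬ (500 ≤ (preComps (preBlanks board).length (preBlanks board)).length ∧
      ∀ s ∈ (preComps (preBlanks board).length (preBlanks board)).take 499, s % 5 = 0)

instance (board : List (List Int)) : Decidable (Pre_ok_blanks board) := by
  unfold Pre_ok_blanks; infer_instance

def pvWitness_ok_blanks : List (List Int) := [[0, 0, 0], [0, 0, 7]]

def Spec_ok_blanks (board : List (List Int)) (out : Bool) : Prop := out = ok_blanks_alt board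
instance (board : List (List Int)) (out : Bool) : Decidable (Spec_ok_blanks board out) := by
  unfold Spec_ok_blanks; infer_instance

-- ===== CLAIM (what is proved, stated in full; the proofs are below) =====
def Claim_equal_ok_blanks : Prop := ∀ (board : List (List Int)), Dom_ok_blanks board → Pre_ok_blanks board → Spec_ok_blanks board (ok_blanks board)

-- ===== LEMMAS AND PROOFS =====

-- the accumulated set curSet is only appended to: recGo at any accumulator cs is the
-- [] run with cs prepended (and the final blank list does not depend on the accumulator)
theorem recGo_shift (fuel : Nat) :
    ∀ (dirs blanks : List (Int × Int)) (current : Int × Int) (cs : List (Int × Int)),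
    recGo fuel dirs blanks cs current
      = ((recGo fuel dirs blanks [] current).1,
         cs ++ (recGo fuel dirs blanks [] current).2) := by
  induction fuel with
  | zero =>
    intro dirs blanks current cs
    cases dirs <;> simp [recGo]
  | succ f ih =>
    intro dirs blanks current cs
    cases dirs with
    | nil => simp [recGo]
    | cons d ds =>
      by_cases h : (current.1 + d.1, current.2 + d.2) ∈ blanks
      · simp only [recGo, if_pos h]
        rw [ih pvDirs (blanks.erase (current.1 + d.1, current.2 + d.2))
              (current.1 + d.1, current.2 + d.2) (cs ++ [(current.1 + d.1, current.2 + d.2)]),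
            ih pvDirs (blanks.erase (current.1 + d.1, current.2 + d.2))
              (current.1 + d.1, current.2 + d.2) ([] ++ [(current.1 + d.1, current.2 + d.2)])]
        rw [ih ds
              (recGo f pvDirs (blanks.erase (current.1 + d.1, current.2 + d.2)) []
                (current.1 + d.1, current.2 + d.2)).1 current
              ((cs ++ [(current.1 + d.1, current.2 + d.2)]) ++
                (recGo f pvDirs (blanks.erase (current.1 + d.1, current.2 + d.2)) []
                  (current.1 + d.1, current.2 + d.2)).2),
            ih ds
              (recGo f pvDirs (blanks.erase (current.1 + d.1, current.2 + d.2)) []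
                (current.1 + d.1, current.2 + d.2)).1 current
              (([] ++ [(current.1 + d.1, current.2 + d.2)]) ++
                (recGo f pvDirs (blanks.erase (current.1 + d.1, current.2 + d.2)) []
                  (current.1 + d.1, current.2 + d.2)).2)]
        simp
      · simp only [recGo, if_neg h]
        exact ih ds blanks current cs

-- machine's step budget from a stack and the remaining blanks (proof-side bookkeeping)
def stepsBound (stack : List ((Int × Int) × List (Int × Int))) (blanks : List (Int × Int)) : Nat :=
  (stack.map (fun fr => fr.2.length + 1)).sum + 5 * blanks.length

-- with enough fuel, the machine's value does not depend on the exact fuel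
theorem machine_irrel (f : Nat) :
    ∀ (g : Nat) (stack : List ((Int × Int) × List (Int × Int))) (blanks : List (Int × Int))
      (size : Int), stepsBound stack blanks < f → stepsBound stack blanks < g →
    machine f stack blanks size = machine g stack blanks size := by
  induction f with
  | zero =>
    intro g stack blanks size hf _
    exact absurd hf (Nat.not_lt_zero _)
  | succ f ih =>
    intro g stack blanks size hf hg
    match stack with
    | [] => cases g <;> simp [machine]
    | (cell, dirs) :: rest =>
      have hg1 : 0 < g := lt_of_le_of_lt (Nat.zero_le _) hg
      obtain ⟨g, rfl⟩ : ∃ g', g = g' + 1 := ⟨g - 1, by omega⟩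
      cases dirs with
      | nil =>
        simp only [machine]
        refine ih g rest blanks size ?_ ?_ <;>
          · simp only [stepsBound, List.map_cons, List.sum_cons] at hf hg ⊢
            omega
      | cons d ds =>
        by_cases h : (cell.1 + d.1, cell.2 + d.2) ∈ blanks
        · simp only [machine, if_pos h]
          have he : (blanks.erase (cell.1 + d.1, cell.2 + d.2)).length = blanks.length - 1 :=
            List.length_erase_of_mem h
          have hpos : 0 < blanks.length := List.length_pos_of_mem h
          refine ih g _ _ (size + 1) ?_ ?_ <;>
            · simp only [stepsBound, List.map_cons, List.sum_cons, pvDirs, List.length_cons,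
                List.length_nil, he] at hf hg ⊢
              omega
        · simp only [machine, if_neg h]
          refine ih g _ _ size ?_ ?_ <;>
            · simp only [stepsBound, List.map_cons, List.sum_cons, List.length_cons] at hf hg ⊢
              omega

-- B's explicit stack drives a frame exactly the way A's recursion drives a call: running the
-- machine from one frame is recGo, with the component size tracked as the curSet growth
theorem machine_frame (fA : Nat) :
    ∀ (dirs blanks : List (Int × Int)) (current : Int × Int),
      5 * blanks.length + dirs.length ≤ fA →
    ∀ (fM : Nat) (rest : List ((Int × Int) × List (Int × Int))) (size : Int),
      stepsBound ((current, dirs) :: rest) blanks < fM →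
    ∀ (g : Nat), stepsBound rest (recGo fA dirs blanks [] current).1 < g →
    machine fM ((current, dirs) :: rest) blanks size
      = machine g rest (recGo fA dirs blanks [] current).1
          (size + ((recGo fA dirs blanks [] current).2.length : Int)) := by
  induction fA with
  | zero =>
    intro dirs blanks current hA fM rest size hM g hg
    have hd : dirs = [] := by
      cases dirs with
      | nil => rfl
      | cons d ds => exfalso; simp only [List.length_cons] at hA; omega
    subst hd
    simp only [recGo, List.length_nil] at hg ⊢
    obtain ⟨fM, rfl⟩ : ∃ f', fM = f' + 1 := ⟨fM - 1, by
      have : 0 < fM := lt_of_le_of_lt (Nat.zero_le _) hM; omega⟩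
    simp only [machine]
    rw [machine_irrel fM g rest blanks size
      (by simp only [stepsBound, List.map_cons, List.sum_cons] at hM ⊢; omega) hg]
    norm_num
  | succ fA ih =>
    intro dirs blanks current hA fM rest size hM g hg
    obtain ⟨fM, rfl⟩ : ∃ f', fM = f' + 1 := ⟨fM - 1, by
      have : 0 < fM := lt_of_le_of_lt (Nat.zero_le _) hM; omega⟩
    cases dirs with
    | nil =>
      simp only [recGo, List.length_nil] at hg ⊢
      simp only [machine]
      rw [machine_irrel fM g rest blanks size
        (by simp only [stepsBound, List.map_cons, List.sum_cons] at hM ⊢; omega) hg]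
      norm_num
    | cons d ds =>
      by_cases h : (current.1 + d.1, current.2 + d.2) ∈ blanks
      · -- A recurses into the neighbour; B pushes the neighbour frame
        have he : (blanks.erase (current.1 + d.1, current.2 + d.2)).length = blanks.length - 1 :=
          List.length_erase_of_mem h
        have hpos : 0 < blanks.length := List.length_pos_of_mem h
        have hE1 := recGo_fst_le fA pvDirs (blanks.erase (current.1 + d.1, current.2 + d.2)) []
          (current.1 + d.1, current.2 + d.2)
        have hS := recGo_fst_le fA ds
          (recGo fA pvDirs (blanks.erase (current.1 + d.1, current.2 + d.2)) []
            (current.1 + d.1, current.2 + d.2)).1 [] current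
        simp only [machine, if_pos h]
        rw [ih pvDirs (blanks.erase (current.1 + d.1, current.2 + d.2))
              (current.1 + d.1, current.2 + d.2)
              (by simp only [pvDirs, List.length_cons, List.length_nil, he]; omega)
              fM ((current, ds) :: rest) (size + 1)
              (by simp only [stepsBound, List.map_cons, List.sum_cons, pvDirs,
                    List.length_cons, List.length_nil, he] at hM ⊢; omega)
              fM
              (by simp only [stepsBound, List.map_cons, List.sum_cons,
                    List.length_cons] at hM ⊢
                  have := hE1
                  have := he
                  omega)]
        rw [ih ds
              (recGo fA pvDirs (blanks.erase (current.1 + d.1, current.2 + d.2)) []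
                (current.1 + d.1, current.2 + d.2)).1 current
              (by have := hE1; simp only [List.length_cons] at hA ⊢; omega)
              fM rest
              (size + 1 + ((recGo fA pvDirs (blanks.erase (current.1 + d.1, current.2 + d.2)) []
                (current.1 + d.1, current.2 + d.2)).2.length : Int))
              (by simp only [stepsBound, List.map_cons, List.sum_cons,
                    List.length_cons] at hM ⊢
                  have := hE1
                  omega)
              g
              (by -- the final blank list of the whole call is the final blank list of the tail run
                  have hunf : (recGo (fA + 1) (d :: ds) blanks [] current).1
                      = (recGo fA ds
                          (recGo fA pvDirs (blanks.erase (current.1 + d.1, current.2 + d.2)) []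
                            (current.1 + d.1, current.2 + d.2)).1 [] current).1 := by
                    simp only [recGo, if_pos h]
                    rw [recGo_shift fA pvDirs (blanks.erase (current.1 + d.1, current.2 + d.2))
                          (current.1 + d.1, current.2 + d.2)
                          ([] ++ [(current.1 + d.1, current.2 + d.2)])]
                    rw [recGo_shift fA ds
                          (recGo fA pvDirs (blanks.erase (current.1 + d.1, current.2 + d.2)) []
                            (current.1 + d.1, current.2 + d.2)).1 current
                          (([] ++ [(current.1 + d.1, current.2 + d.2)]) ++
                            (recGo fA pvDirs (blanks.erase (current.1 + d.1, current.2 + d.2)) []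
                              (current.1 + d.1, current.2 + d.2)).2)]
                  rw [hunf] at hg
                  exact hg)]
        -- both sides are now a run of `machine g rest …`; align blank list and size
        have hunf2 : recGo (fA + 1) (d :: ds) blanks [] current
            = ((recGo fA ds
                  (recGo fA pvDirs (blanks.erase (current.1 + d.1, current.2 + d.2)) []
                    (current.1 + d.1, current.2 + d.2)).1 [] current).1,
               ([] ++ [(current.1 + d.1, current.2 + d.2)]) ++
                 (recGo fA pvDirs (blanks.erase (current.1 + d.1, current.2 + d.2)) []
                   (current.1 + d.1, current.2 + d.2)).2 ++
                 (recGo fA ds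
                   (recGo fA pvDirs (blanks.erase (current.1 + d.1, current.2 + d.2)) []
                     (current.1 + d.1, current.2 + d.2)).1 [] current).2) := by
          simp only [recGo, if_pos h]
          rw [recGo_shift fA pvDirs (blanks.erase (current.1 + d.1, current.2 + d.2))
                (current.1 + d.1, current.2 + d.2)
                ([] ++ [(current.1 + d.1, current.2 + d.2)])]
          rw [recGo_shift fA ds
                (recGo fA pvDirs (blanks.erase (current.1 + d.1, current.2 + d.2)) []
                  (current.1 + d.1, current.2 + d.2)).1 current
                (([] ++ [(current.1 + d.1, current.2 + d.2)]) ++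
                  (recGo fA pvDirs (blanks.erase (current.1 + d.1, current.2 + d.2)) []
                    (current.1 + d.1, current.2 + d.2)).2)]
        rw [hunf2]
        congr 1
        simp only [List.nil_append, List.cons_append, List.length_cons, List.length_append]
        push_cast
        ring
      · -- neighbour not blank: both sides move on to the next direction
        simp only [machine, if_neg h]
        have hunf : recGo (fA + 1) (d :: ds) blanks [] current
            = recGo fA ds blanks [] current := by
          simp only [recGo, if_neg h]
        rw [hunf] at hg ⊢
        exact ih ds blanks current
          (by simp only [List.length_cons] at hA ⊢; omega)
          fM rest size
          (by simp only [stepsBound, List.map_cons, List.sum_cons, List.length_cons] at hM ⊢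
              omega)
          g hg

-- the two outer while-loops agree
theorem loopAB (blanks : List (Int × Int)) (stuck : Int) : loopA blanks stuck = loopB blanks stuck := by
  induction blanks, stuck using loopA.induct with
  | case1 stuck => rw [loopA.eq_def, loopB.eq_def]
  | case2 stuck b rest stuck' h500 =>
    rw [loopA.eq_def, loopB.eq_def]
    dsimp only
    rw [if_pos h500, if_pos h500]
  | case3 stuck b rest stuck' h500 r hcond =>
    rw [loopA.eq_def, loopB.eq_def]
    dsimp only
    rw [if_neg h500, if_neg h500]
    rw [machine_frame (5 * rest.length + 5) pvDirs rest b
          (by simp only [pvDirs, List.length_cons, List.length_nil]; omega)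
          (5 * rest.length + 6) [] 1
          (by simp only [stepsBound, List.map_cons, List.map_nil, List.sum_cons, List.sum_nil,
                pvDirs, List.length_cons, List.length_nil]
              omega)
          (5 * (recGo (5 * rest.length + 5) pvDirs rest [] b).1.length + 1)
          (by simp only [stepsBound, List.map_nil, List.sum_nil]; omega)]
    rw [machine.eq_def]
    dsimp only
    have hval := recGo_shift (5 * rest.length + 5) pvDirs rest b [b]
    have hlen : (((recGo (5 * rest.length + 5) pvDirs rest [b] b).2.length : Nat) : Int)
        = 1 + ((recGo (5 * rest.length + 5) pvDirs rest [] b).2.length : Int) := by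
      rw [hval]
      simp only [List.length_append, List.length_cons, List.length_nil]
      push_cast
      ring
    rw [← hlen]
    rw [show PySem.Int.mod (((recGo (5 * rest.length + 5) pvDirs rest [b] b).2.length : Nat) : Int) 5
          = (((recGo (5 * rest.length + 5) pvDirs rest [b] b).2.length % 5 : Nat) : Int) from
        PySem.Int.mod_natCast _ 5]
    have hc' : ((((recGo (5 * rest.length + 5) pvDirs rest [b] b).2.length % 5 : Nat) : Int) ≠ 0) :=
      Int.natCast_ne_zero.mpr hcond
    rw [if_pos hcond, if_pos hc']
  | case4 stuck b rest stuck' h500 r hcond ih =>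
    rw [loopA.eq_def, loopB.eq_def]
    dsimp only
    rw [if_neg h500, if_neg h500]
    rw [machine_frame (5 * rest.length + 5) pvDirs rest b
          (by simp only [pvDirs, List.length_cons, List.length_nil]; omega)
          (5 * rest.length + 6) [] 1
          (by simp only [stepsBound, List.map_cons, List.map_nil, List.sum_cons, List.sum_nil,
                pvDirs, List.length_cons, List.length_nil]
              omega)
          (5 * (recGo (5 * rest.length + 5) pvDirs rest [] b).1.length + 1)
          (by simp only [stepsBound, List.map_nil, List.sum_nil]; omega)]
    rw [machine.eq_def]
    dsimp only
    have hval := recGo_shift (5 * rest.length + 5) pvDirs rest b [b]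
    have hlen : (((recGo (5 * rest.length + 5) pvDirs rest [b] b).2.length : Nat) : Int)
        = 1 + ((recGo (5 * rest.length + 5) pvDirs rest [] b).2.length : Int) := by
      rw [hval]
      simp only [List.length_append, List.length_cons, List.length_nil]
      push_cast
      ring
    rw [← hlen]
    rw [show PySem.Int.mod (((recGo (5 * rest.length + 5) pvDirs rest [b] b).2.length : Nat) : Int) 5
          = (((recGo (5 * rest.length + 5) pvDirs rest [b] b).2.length % 5 : Nat) : Int) from
        PySem.Int.mod_natCast _ 5]
    have hc' : ¬ ((((recGo (5 * rest.length + 5) pvDirs rest [b] b).2.length % 5 : Nat) : Int) ≠ 0) := by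
      simp only [ne_eq, not_not] at hcond ⊢
      exact_mod_cast hcond
    rw [if_neg hcond, if_neg hc']
    have hfst : (recGo (5 * rest.length + 5) pvDirs rest [b] b).1
        = (recGo (5 * rest.length + 5) pvDirs rest [] b).1 := by
      rw [hval]
    rw [hfst]
    have ih' : loopA (recGo (5 * rest.length + 5) pvDirs rest [] b).1 stuck'
        = loopB (recGo (5 * rest.length + 5) pvDirs rest [] b).1 stuck' := by
      rw [← hfst]; exact ih
    exact ih'

theorem blanksAB (board : List (List Int)) : blanksA board = blanksB board := by
  unfold blanksA blanksB
  rw [PySem.List.enumerate_eq_map_pyRange board ([] : List Int)]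
  rw [List.foldl_map]
  have hlen : PySem.List.len board = ((board.length : Nat) : Int) := by
    simp [PySem.List.len]
  rw [hlen, PySem.List.pyRange_zero_natCast, List.foldl_map]
  clear hlen
  have hw : (match board with | [] => 0 | r :: _ => r.length) = (board.headD []).length := by
    cases board <;> rfl
  rw [hw]
  refine PySem.List.foldl_congr_mem _ _ _ _ ?_
  intro acc y _
  dsimp only
  rw [PySem.List.pyGetD_natCast]

theorem ok_blanks_eq_alt (board : List (List Int)) : ok_blanks board = ok_blanks_alt board := by
  unfold ok_blanks ok_blanks_alt
  rw [blanksAB]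
  exact loopAB (blanksB board) 0

-- ===== VERDICT (by name: the statement is the Claim_ definition above) =====
theorem ok_blanks_spec : Claim_equal_ok_blanks := by
  intro board _ _
  unfold Spec_ok_blanks
  exact ok_blanks_eq_alt board
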